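-- pv_equiv track=rewrite | github.com/cbib/TrialMatchAI | src/entity_recognition.py | find_and_remove_overlaps
-- ===== SOURCE A (Python) =====
-- def find_and_remove_overlaps(dictionary_list, if_overlap_keep):
--     # Create a dictionary to store non-overlapping entries
--     non_overlapping = {}
--     # Create a set of entity groups to keep
--     preferred_set = set(if_overlap_keep)
--
--     # Iterate through the input list
--     for entry in dictionary_list:
--         text = entry['text']
--         group = entry['entity_group']
--
--         # Check if the text is already in the non_overlapping dictionary
--         if text in non_overlapping:
--             # Compare groups and keep the entry if it belongs to one of the preferred groups
--             if group in preferred_set: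
--                 non_overlapping[text] = entry
--         else:
--             non_overlapping[text] = entry
--
--     # Convert the non-overlapping dictionary back to a list
--     result_list = list(non_overlapping.values())
--
--     return result_list
-- ===== SOURCE B (Python) =====
-- def find_and_remove_overlaps(dictionary_list, if_overlap_keep):
--     preferred = set(if_overlap_keep)
--
--     # Pass 1: group entries by text, keeping first-seen key order.
--     groups = {}
--     for entry in dictionary_list:
--         groups.setdefault(entry['text'], []).append(entry)
--
--     # Pass 2: reduce each group to one representative: the last entry whose
--     # entity_group is preferred, or the group's first entry otherwise.
--     result = []
--     for entries in groups.values():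
--         rep = entries[0]
--         for e in entries[1:]:
--             if e['entity_group'] in preferred:
--                 rep = e
--         result.append(rep)
--     return result
-- ===== Notes on version B (the rewrite author's own statement) =====
-- stated objective: alternative
-- what changed: Replaces A's fused single-pass overwrite-on-conflict dict with a collect-then-reduce decomposition: first group all entries by text (first-seen order), then reduce each group to the last preferred entry or its first entry.
-- outside the precondition, e.g. on find_and_remove_overlaps([{'text': 'a'}], ['G']): A raises KeyError, B returns [{'text': 'a'}]
import Mathlib
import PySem

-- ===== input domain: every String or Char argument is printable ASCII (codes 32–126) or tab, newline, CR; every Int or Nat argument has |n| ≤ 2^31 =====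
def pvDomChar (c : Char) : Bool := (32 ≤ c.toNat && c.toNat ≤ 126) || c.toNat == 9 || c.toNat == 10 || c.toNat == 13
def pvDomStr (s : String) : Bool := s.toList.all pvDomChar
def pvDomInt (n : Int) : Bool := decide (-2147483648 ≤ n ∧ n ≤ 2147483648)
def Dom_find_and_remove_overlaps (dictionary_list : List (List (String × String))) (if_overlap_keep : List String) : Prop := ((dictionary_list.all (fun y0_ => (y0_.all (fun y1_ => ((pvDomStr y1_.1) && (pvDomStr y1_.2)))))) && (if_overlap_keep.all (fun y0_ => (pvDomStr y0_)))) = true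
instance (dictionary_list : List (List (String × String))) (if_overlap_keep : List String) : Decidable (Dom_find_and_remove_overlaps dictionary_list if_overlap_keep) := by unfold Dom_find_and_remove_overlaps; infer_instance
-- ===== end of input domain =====

-- B replaces A's fused overwrite-on-conflict pass by a collect-then-reduce decomposition (objective: alternative, same cost).

-- entry['text'] / entry['entity_group']: Python dict lookup on the entry (exact; '' default only reached outside Pre_)
def pvText (entry : List (String × String)) : String :=
  ((PySem.Dict.mk entry).get? "text").getD ""
def pvGroupOf (entry : List (String × String)) : String :=
  ((PySem.Dict.mk entry).get? "entity_group").getD ""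

-- ===== PORT A =====
def pvStepA (preferred_set : PySem.Set String)
    (non : PySem.Dict String (List (String × String))) (entry : List (String × String)) :
    PySem.Dict String (List (String × String)) :=
  if non.contains (pvText entry) then
    if preferred_set.contains (pvGroupOf entry) then non.insert (pvText entry) entry else non
  else
    non.insert (pvText entry) entry

def find_and_remove_overlaps (dictionary_list : List (List (String × String))) (if_overlap_keep : List String) : List (List (String × String)) :=
  let preferred_set := PySem.Set.ofList if_overlap_keep
  let non_overlapping := dictionary_list.foldl (pvStepA preferred_set) PySem.Dict.empty
  non_overlapping.values

-- ===== PORT B =====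
-- pass 1: groups.setdefault(entry['text'], []).append(entry)
def pvStepG (g : PySem.Dict String (List (List (String × String)))) (entry : List (String × String)) :
    PySem.Dict String (List (List (String × String))) :=
  g.modify (pvText entry) [] (· ++ [entry])

-- pass 2 body: rep = entries[0]; for e in entries[1:]: if preferred: rep = e
def pvPick (preferred : PySem.Set String) (entries : List (List (String × String))) : List (String × String) :=
  match entries with
  | [] => []
  | rep0 :: rest => rest.foldl (fun rep e => if preferred.contains (pvGroupOf e) then e else rep) rep0

def find_and_remove_overlaps_alt (dictionary_list : List (List (String × String))) (if_overlap_keep : List String) : List (List (String × String)) :=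
  let preferred := PySem.Set.ofList if_overlap_keep
  let groups := dictionary_list.foldl pvStepG PySem.Dict.empty
  (groups.values).map (pvPick preferred)

-- ===== PRECONDITION & SPEC =====
-- Pre_ excludes exactly the inputs where A raises KeyError: an entry missing the 'text' or 'entity_group' key.
def Pre_find_and_remove_overlaps (dictionary_list : List (List (String × String))) (if_overlap_keep : List String) : Prop :=
  dictionary_list.all (fun e => (PySem.Dict.mk e).contains "text" && (PySem.Dict.mk e).contains "entity_group") = true
instance (dictionary_list : List (List (String × String))) (if_overlap_keep : List String) : Decidable (Pre_find_and_remove_overlaps dictionary_list if_overlap_keep) := by unfold Pre_find_and_remove_overlaps; infer_instance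
def pvWitness_find_and_remove_overlaps : (List (List (String × String))) × List String :=
  ([[("text", "a"), ("entity_group", "G")], [("text", "a"), ("entity_group", "H")]], ["H"])

def Spec_find_and_remove_overlaps (dictionary_list : List (List (String × String))) (if_overlap_keep : List String) (out : List (List (String × String))) : Prop := out = find_and_remove_overlaps_alt dictionary_list if_overlap_keep
instance (dictionary_list : List (List (String × String))) (if_overlap_keep : List String) (out : List (List (String × String))) : Decidable (Spec_find_and_remove_overlaps dictionary_list if_overlap_keep out) := by unfold Spec_find_and_remove_overlaps; infer_instance

-- ===== CLAIM (what is proved, stated in full; the proofs are below) =====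
def Claim_equal_find_and_remove_overlaps : Prop := ∀ (dictionary_list : List (List (String × String))) (if_overlap_keep : List String), Dom_find_and_remove_overlaps dictionary_list if_overlap_keep → Pre_find_and_remove_overlaps dictionary_list if_overlap_keep → Spec_find_and_remove_overlaps dictionary_list if_overlap_keep (find_and_remove_overlaps dictionary_list if_overlap_keep)

-- ===== LEMMAS AND PROOFS =====

-- pick of a one-longer group: the appended entry wins iff its group is preferred
lemma pvPick_append_singleton (pref : PySem.Set String) (xs : List (List (String × String)))
    (hne : xs ≠ []) (e : List (String × String)) :
    pvPick pref (xs ++ [e]) = if pref.contains (pvGroupOf e) then e else pvPick pref xs := by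
  match xs, hne with
  | x :: rest, _ =>
    simp [pvPick, List.foldl_append]

-- the loop invariant tying A's accumulator to B's grouping accumulator
def pvInv (pref : PySem.Set String)
    (dA : PySem.Dict String (List (String × String)))
    (dG : PySem.Dict String (List (List (String × String)))) : Prop :=
  dA.keys = dG.keys ∧ dG.keys.Nodup ∧
  ∀ k ∈ dG.keys, dG.getD k [] ≠ [] ∧ dA.getD k [] = pvPick pref (dG.getD k [])

lemma pvStepG_getD (dG : PySem.Dict String (List (List (String × String))))
    (e : List (String × String)) (k : String) :
    (pvStepG dG e).getD k [] =
      if k = pvText e then dG.getD (pvText e) [] ++ [e] else dG.getD k [] := by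
  unfold pvStepG; rw [PySem.Dict.getD_modify]

lemma pvInv_step (pref : PySem.Set String) (dA : PySem.Dict String (List (String × String)))
    (dG : PySem.Dict String (List (List (String × String)))) (e : List (String × String))
    (h : pvInv pref dA dG) : pvInv pref (pvStepA pref dA e) (pvStepG dG e) := by
  obtain ⟨hkeys, hnd, hval⟩ := h
  have hc : dA.contains (pvText e) = dG.contains (pvText e) := by
    rw [PySem.Dict.contains_eq_decide_mem_keys, PySem.Dict.contains_eq_decide_mem_keys, hkeys]
  by_cases hmem : dG.contains (pvText e) = true
  · -- text already present: A maybe overwrites; B appends to the group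
    have hA : dA.contains (pvText e) = true := by rw [hc]; exact hmem
    have hGkeys : (pvStepG dG e).keys = dG.keys := by
      unfold pvStepG
      rw [PySem.Dict.keys_modify, PySem.Dict.keys_insert_of_contains _ _ hmem]
    have hAkeys : (pvStepA pref dA e).keys = dA.keys := by
      unfold pvStepA; rw [hA]
      split_ifs <;> simp_all [PySem.Dict.keys_insert_of_contains _ _ hA]
    have hAk : ∀ k, (pvStepA pref dA e).getD k [] =
        if pref.contains (pvGroupOf e) = true then
          (if k = pvText e then e else dA.getD k []) else dA.getD k [] := by
      intro k
      unfold pvStepA; rw [hA]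
      split_ifs with hp h1 h1 <;> simp_all [PySem.Dict.getD_insert]
    refine ⟨by rw [hAkeys, hGkeys, hkeys], by rw [hGkeys]; exact hnd, ?_⟩
    intro k hk
    rw [hGkeys] at hk
    obtain ⟨hne, hv⟩ := hval k hk
    rw [pvStepG_getD, hAk]
    by_cases hke : k = pvText e
    · subst hke
      simp only [if_pos rfl, if_true]
      refine ⟨by simp, ?_⟩
      rw [pvPick_append_singleton pref _ hne e]
      split_ifs with hp <;> simp [hv]
    · simp only [if_neg hke]
      exact ⟨hne, by split_ifs with hp <;> exact hv⟩
  · -- fresh text: both sides append a new key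
    have hmemf : dG.contains (pvText e) = false := by simpa using hmem
    have hAf : dA.contains (pvText e) = false := by rw [hc]; exact hmemf
    have hGkeys : (pvStepG dG e).keys = dG.keys ++ [pvText e] := by
      unfold pvStepG
      rw [PySem.Dict.keys_modify, PySem.Dict.keys_insert_of_not_contains _ _ hmemf]
    have hAkeys : (pvStepA pref dA e).keys = dA.keys ++ [pvText e] := by
      unfold pvStepA; rw [hAf]
      simp only [Bool.false_eq_true, if_false]
      exact PySem.Dict.keys_insert_of_not_contains _ _ hAf
    have hnotmem : pvText e ∉ dG.keys := by
      intro hin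
      have := (PySem.Dict.contains_iff_mem_keys (d := dG) (k := pvText e)).mpr hin
      simp [this] at hmemf
    have hAk : ∀ k, (pvStepA pref dA e).getD k [] =
        if k = pvText e then e else dA.getD k [] := by
      intro k
      unfold pvStepA; rw [hAf]
      simp only [Bool.false_eq_true, if_false]
      rw [PySem.Dict.getD_insert]
    refine ⟨by rw [hAkeys, hGkeys, hkeys], ?_, ?_⟩
    · rw [hGkeys]
      exact List.Nodup.append hnd (List.nodup_singleton _) (by simpa using hnotmem)
    · intro k hk
      rw [pvStepG_getD, hAk]
      by_cases hke : k = pvText e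
      · subst hke
        have hGnone : dG.getD (pvText e) [] = [] :=
          PySem.Dict.getD_of_not_contains (d := dG) (d0 := []) hmemf
        simp only [if_pos rfl, if_true, hGnone]
        exact ⟨by simp, rfl⟩
      · simp only [if_neg hke]
        rw [hGkeys] at hk
        rcases List.mem_append.mp hk with hk2 | hk2
        · exact hval k hk2
        · simp at hk2; exact absurd hk2 hke

lemma pvInv_foldl (pref : PySem.Set String) (l : List (List (String × String)))
    (dA : PySem.Dict String (List (String × String)))
    (dG : PySem.Dict String (List (List (String × String))))
    (h : pvInv pref dA dG) :
    pvInv pref (l.foldl (pvStepA pref) dA) (l.foldl pvStepG dG) := by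
  induction l generalizing dA dG with
  | nil => exact h
  | cons e t ih => exact ih _ _ (pvInv_step pref dA dG e h)

-- ===== VERDICT (by name: the statement is the Claim_ definition above) =====
theorem find_and_remove_overlaps_spec : Claim_equal_find_and_remove_overlaps := by
  intro dl keep _ _
  unfold Spec_find_and_remove_overlaps find_and_remove_overlaps find_and_remove_overlaps_alt
  dsimp only
  have h0 : pvInv (PySem.Set.ofList keep) PySem.Dict.empty PySem.Dict.empty :=
    ⟨rfl, PySem.Dict.nodup_keys_empty, by intro k hk; simp [PySem.Dict.keys_empty] at hk⟩
  obtain ⟨hkeys, hnd, hval⟩ := pvInv_foldl (PySem.Set.ofList keep) dl _ _ h0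
  set pref := PySem.Set.ofList keep
  set dA := dl.foldl (pvStepA pref) PySem.Dict.empty with hdA
  set dG := dl.foldl pvStepG PySem.Dict.empty with hdG
  rw [PySem.Dict.values_eq_map_keys dA (hkeys ▸ hnd) [],
      PySem.Dict.values_eq_map_keys dG hnd [], hkeys, List.map_map]
  exact List.map_congr_left fun k hk => (hval k hk).2
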